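-- pv_equiv track=rewrite | github.com/pythagoreantree/python-Yandex-1 | work_txt.py | get_navigator_field
-- ===== SOURCE A (Python) =====
-- def get_navigator_field(x0, y0, offset):
--     navigator_coords = set()
--     for a in range(-offset, offset + 1):
--         for b in range(-offset, offset + 1):
--             norma = abs(a - x0) + abs(b - y0)
--             if norma <= offset:
--                 navigator_coords.add((a, b))
--     return navigator_coords
-- ===== SOURCE B (Python) =====
-- def get_navigator_field(x0, y0, offset):
--     # Per-row interval: for each row a, the valid b's form one closed-form range
--     # (empty when the row is outside the diamond); collect all cells in one set comprehension.
--     return {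
--         (a, b)
--         for a in range(-offset, offset + 1)
--         for b in range(max(-offset, y0 - (offset - abs(a - x0))),
--                        min(offset, y0 + (offset - abs(a - x0))) + 1)
--     }
-- ===== Notes on version B (the rewrite author's own statement) =====
-- stated objective: alternative
-- what changed: A scans the full (2*offset+1)^2 grid testing the L1 norm on each cell and conditionally adds to a set; B is a single set comprehension that, per row, enumerates only the closed-form interval of valid b's (empty ranges skip rows), so no norm test and no conditional add remain.
import Mathlib
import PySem

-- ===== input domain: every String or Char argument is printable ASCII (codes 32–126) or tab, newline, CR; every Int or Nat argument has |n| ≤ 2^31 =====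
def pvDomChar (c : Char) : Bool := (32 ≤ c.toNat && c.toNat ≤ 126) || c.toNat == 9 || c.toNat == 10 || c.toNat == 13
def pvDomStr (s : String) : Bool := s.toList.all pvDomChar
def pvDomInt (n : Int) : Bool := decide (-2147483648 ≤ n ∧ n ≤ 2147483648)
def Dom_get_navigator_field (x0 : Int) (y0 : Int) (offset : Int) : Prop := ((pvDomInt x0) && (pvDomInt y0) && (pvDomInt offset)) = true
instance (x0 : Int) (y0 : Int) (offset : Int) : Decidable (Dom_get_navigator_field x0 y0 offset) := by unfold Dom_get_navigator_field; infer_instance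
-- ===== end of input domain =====

-- B replaces A's full-grid scan with a norm test on every cell by a single set
-- comprehension that enumerates, per row, only the closed-form interval of valid b's.

-- ===== PORT A =====
def get_navigator_field (x0 : Int) (y0 : Int) (offset : Int) : List (Int × Int) :=
  (PySem.List.pyRange (-offset) (offset + 1) 1).foldl (fun s a =>
    (PySem.List.pyRange (-offset) (offset + 1) 1).foldl (fun s b =>
      let norma := |a - x0| + |b - y0|
      if norma ≤ offset then PySem.Set.add s (a, b) else s) s)
    PySem.Set.empty

-- ===== PORT B =====
def get_navigator_field_alt (x0 : Int) (y0 : Int) (offset : Int) : List (Int × Int) :=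
  PySem.Set.ofList
    ((PySem.List.pyRange (-offset) (offset + 1) 1).flatMap (fun a =>
      (PySem.List.pyRange (max (-offset) (y0 - (offset - |a - x0|)))
          (min offset (y0 + (offset - |a - x0|)) + 1) 1).map (fun b => (a, b))))

-- ===== PRECONDITION & SPEC =====
def Spec_get_navigator_field (x0 : Int) (y0 : Int) (offset : Int) (out : List (Int × Int)) : Prop := out = get_navigator_field_alt x0 y0 offset
instance (x0 : Int) (y0 : Int) (offset : Int) (out : List (Int × Int)) : Decidable (Spec_get_navigator_field x0 y0 offset out) := by unfold Spec_get_navigator_field; infer_instance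

-- ===== CLAIM (what is proved, stated in full; the proofs are below) =====
def Claim_equal_get_navigator_field : Prop := ∀ (x0 : Int) (y0 : Int) (offset : Int), Dom_get_navigator_field x0 y0 offset → Spec_get_navigator_field x0 y0 offset (get_navigator_field x0 y0 offset)

-- ===== LEMMAS AND PROOFS =====

-- Folding over a flattened comprehension equals the nested fold.
theorem pv_foldl_flatMap {α β γ : Type} (g : α → List β) (f : γ → β → γ) :
    ∀ (l : List α) (s : γ),
      (l.flatMap g).foldl f s = l.foldl (fun s a => (g a).foldl f s) s := by
  intro l
  induction l with
  | nil => intro s; rfl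
  | cons x xs ih => intro s; simp [List.flatMap_cons, List.foldl_append, ih]

-- A conditional fold is the fold of the filtered list.
theorem pv_foldl_ite_filter {α β : Type} (p : α → Bool) (f : β → α → β) :
    ∀ (l : List α) (s : β),
      l.foldl (fun s x => if p x then f s x else s) s = (l.filter p).foldl f s := by
  intro l
  induction l with
  | nil => intro s; rfl
  | cons x xs ih =>
    intro s
    by_cases h : p x = true
    · simp [h, ih]
    · simp [h, ih]

-- Filtering an integer range by an interval test yields the clipped range.
theorem pv_filter_range_interval (lo hi : Int) :
    ∀ (n : Nat) (a b : Int), (b - a).toNat = n →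
      (PySem.List.pyRange a b 1).filter (fun x => decide (lo ≤ x ∧ x ≤ hi)) =
        PySem.List.pyRange (max a lo) (min b (hi + 1)) 1 := by
  intro n
  induction n with
  | zero =>
    intro a b hn
    have hba : b ≤ a := by omega
    rw [PySem.List.pyRange_one_eq_nil hba,
        PySem.List.pyRange_one_eq_nil (by omega : min b (hi + 1) ≤ max a lo)]
    rfl
  | succ m ih =>
    intro a b hn
    have hab : a < b := by omega
    rw [PySem.List.pyRange_one_cons hab, List.filter_cons,
        ih (a + 1) b (by omega)]
    by_cases h : lo ≤ a ∧ a ≤ hi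
    · have hmax : max a lo = a := by omega
      have hmax' : max (a + 1) lo = a + 1 := by omega
      have hcons : a < min b (hi + 1) := by omega
      rw [hmax', hmax, PySem.List.pyRange_one_cons hcons]
      simp [h]
    · simp only [decide_eq_true_eq, h, if_false]
      rcases (by omega : a < lo ∨ hi < a) with hc | hc
      · have : max (a + 1) lo = max a lo := by omega
        rw [this]
      · rw [PySem.List.pyRange_one_eq_nil (by omega : min b (hi + 1) ≤ max a lo),
            PySem.List.pyRange_one_eq_nil (by omega : min b (hi + 1) ≤ max (a + 1) lo)]

-- One row of A equals one clipped row of B.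
theorem pv_row_eq (x0 y0 offset a : Int) (s : List (Int × Int)) :
    (PySem.List.pyRange (-offset) (offset + 1) 1).foldl (fun s b =>
        let norma := |a - x0| + |b - y0|
        if norma ≤ offset then PySem.Set.add s (a, b) else s) s =
      (PySem.List.pyRange (max (-offset) (y0 - (offset - |a - x0|)))
          (min offset (y0 + (offset - |a - x0|)) + 1) 1).foldl
        (fun s b => PySem.Set.add s (a, b)) s := by
  set rem : Int := offset - |a - x0| with hrem
  have hpred : ∀ b : Int, (|a - x0| + |b - y0| ≤ offset) ↔ (y0 - rem ≤ b ∧ b ≤ y0 + rem) := by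
    intro b
    rw [hrem]
    constructor
    · intro h
      have := abs_nonneg (a - x0)
      have h2 : |b - y0| ≤ offset - |a - x0| := by omega
      have := abs_le.mp h2
      omega
    · intro h
      have h2 : |b - y0| ≤ offset - |a - x0| := abs_le.mpr (by omega)
      omega
  have hstep := pv_foldl_ite_filter (fun b : Int => decide (|a - x0| + |b - y0| ≤ offset))
    (fun (s : List (Int × Int)) (b : Int) => PySem.Set.add s (a, b))
    (PySem.List.pyRange (-offset) (offset + 1) 1) s
  simp only [decide_eq_true_eq] at hstep
  rw [hstep]
  have hfc : (PySem.List.pyRange (-offset) (offset + 1) 1).filter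
        (fun b => decide (|a - x0| + |b - y0| ≤ offset)) =
      (PySem.List.pyRange (-offset) (offset + 1) 1).filter
        (fun b => decide (y0 - rem ≤ b ∧ b ≤ y0 + rem)) := by
    apply List.filter_congr
    intro b _
    simp [hpred b]
  rw [hfc, pv_filter_range_interval (y0 - rem) (y0 + rem) _ (-offset) (offset + 1) rfl]
  have : min (offset + 1) (y0 + rem + 1) = min offset (y0 + rem) + 1 := by omega
  rw [this]

-- ===== VERDICT (by name: the statement is the Claim_ definition above) =====
theorem get_navigator_field_spec : Claim_equal_get_navigator_field := by
  intro x0 y0 offset _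
  unfold Spec_get_navigator_field get_navigator_field get_navigator_field_alt
  rw [PySem.Set.ofList_eq_foldl, pv_foldl_flatMap]
  apply PySem.List.foldl_congr_mem
  intro s a _
  rw [List.foldl_map]
  exact pv_row_eq x0 y0 offset a s
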